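-- pv_equiv track=rewrite | github.com/hojoungjang/programming-exercises | 지게차와-크레인/solution.py | solution
-- ===== SOURCE A (Python) =====
-- EMPTY = "."
--
-- def solution(storage, requests):
--
--     def dfs(r, c, visited):
--         if r < 0 or r >= n or c < 0 or c >= m:
--             return True
--
--         if storage_status[r][c] != EMPTY:
--             return False
--
--         visited.add((r,c))
--
--         result = False
--         for offset in [(1,0), (-1,0), (0,1), (0,-1)]:
--             new_r = r+offset[0]
--             new_c = c+offset[1]
--             if (new_r, new_c) in visited:
--                 continue
--             result |= dfs(new_r, new_c, visited)
--         return result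
--
--     def can_remove(r, c):
--         visited = set([(r, c)])
--         for offset in [(1,0), (-1,0), (0,1), (0,-1)]:
--             r_offset, c_offset = offset
--             if dfs(r + r_offset, c + c_offset, visited):
--                 return True
--         return False
--
--     n = len(storage)
--     m = len(storage[0])
--     storage_status = [[c for c in r] for r in storage]
--     left = n * m
--
--     for request in requests:
--         force = len(request) == 2
--         target = request[0]
--         remove_queue = []
--
--         for r in range(n):
--             for c in range(m):
--                 if storage_status[r][c] == target and (force or can_remove(r, c)):
--                     remove_queue.append((r, c))
--
--         for r, c in remove_queue:
--             storage_status[r][c] = EMPTY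
--
--         left -= len(remove_queue)
--
--     return left
-- ===== SOURCE B (Python) =====
-- EMPTY = "."
--
-- def solution(storage, requests):
--     n, m = len(storage), len(storage[0])
--     grid = [list(row) for row in storage]
--     left = n * m
--     offsets = ((1, 0), (-1, 0), (0, 1), (0, -1))
--
--     def outside(r, c):
--         return not (0 <= r < n and 0 <= c < m)
--
--     def outside_reach():
--         # empty cells connected to the exterior: sweep the grid, marking every
--         # empty cell that touches the outside or an already-marked cell, and
--         # repeat until a sweep marks nothing new
--         reach = set()
--         while True:
--             before = len(reach)
--             for r in range(n):
--                 for c in range(m):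
--                     if grid[r][c] == EMPTY and \
--                        any(outside(r + dr, c + dc) or (r + dr, c + dc) in reach
--                            for dr, dc in offsets):
--                         reach.add((r, c))
--             for r in reversed(range(n)):
--                 for c in reversed(range(m)):
--                     if grid[r][c] == EMPTY and \
--                        any(outside(r + dr, c + dc) or (r + dr, c + dc) in reach
--                            for dr, dc in offsets):
--                         reach.add((r, c))
--             if len(reach) == before:
--                 return reach
--
--     for request in requests:
--         force = len(request) == 2
--         target = request[0]
--         matches = [(r, c) for r in range(n) for c in range(m)
--                    if grid[r][c] == target]
--         if force:
--             removed = matches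
--         elif matches:
--             reach = outside_reach()
--             removed = [(r, c) for r, c in matches
--                        if any(outside(r + dr, c + dc) or (r + dr, c + dc) in reach
--                               for dr, dc in offsets)]
--         else:
--             removed = []
--         for r, c in removed:
--             grid[r][c] = EMPTY
--         left -= len(removed)
--     return left
-- ===== Notes on version B (the rewrite author's own statement) =====
-- stated objective: alternative
-- what changed: A answers each candidate box with its own recursive DFS to the exterior; B first collects the cells matching the request, and only if there are any computes the set of empty cells connected to the exterior by repeating an alternating forward/reverse grid sweep (marking empty cells that touch the outside or an already-marked cell) until nothing new is marked, then calls a candidate removable iff a neighbour is out of bounds or in that set. Pre_ excludes only inputs where A raises IndexError (empty storage, an empty request string, or a row shorter than the first row when there are requests).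
import Mathlib
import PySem

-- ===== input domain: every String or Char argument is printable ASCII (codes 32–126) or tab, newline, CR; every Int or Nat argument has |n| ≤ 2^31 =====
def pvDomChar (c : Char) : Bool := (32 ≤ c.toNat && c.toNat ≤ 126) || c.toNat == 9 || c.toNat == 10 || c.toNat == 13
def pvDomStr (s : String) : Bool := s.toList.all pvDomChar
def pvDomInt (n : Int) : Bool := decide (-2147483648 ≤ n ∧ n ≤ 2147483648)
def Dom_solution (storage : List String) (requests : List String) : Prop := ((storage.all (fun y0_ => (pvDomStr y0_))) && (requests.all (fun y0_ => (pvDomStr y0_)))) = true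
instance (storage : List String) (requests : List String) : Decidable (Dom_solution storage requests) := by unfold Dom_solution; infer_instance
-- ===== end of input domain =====

-- B replaces A's per-candidate recursive DFS to the exterior by one exterior-connected
-- set of empty cells per request, computed by iterating a one-step neighbour rule to a
-- fixpoint; a cell is removable iff a neighbour is out of bounds or in that set
-- (objective: alternative algorithm, same measured cost).

-- ----- shared cell primitives (used by both ports) -----

/-- `grid[r][c]`; the `'?'` default is never reached on the stated domain. -/
def gridGet (g : List (List Char)) (r c : Int) : Char :=
  PySem.List.pyGetD (PySem.List.pyGetD g r []) c '?'

/-- `grid[r][c] = v` -/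
def setCell (g : List (List Char)) (r c : Int) (v : Char) : List (List Char) :=
  PySem.List.pySetD g r (PySem.List.pySetD (PySem.List.pyGetD g r []) c v)

/-- the four offsets `[(1,0),(-1,0),(0,1),(0,-1)]` -/
def offsP : List (Int × Int) := [(1,0),(-1,0),(0,1),(0,-1)]

-- ===== PORT A =====

/-- A's recursive `dfs` (shared `visited` set threaded through; the fuel only
makes the recursion structural — `canRemoveA` passes enough, as the proofs show). -/
def dfsA (g : List (List Char)) (n m : Int) :
    Nat → Int → Int → PySem.Set (Int × Int) → Bool × PySem.Set (Int × Int)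
  | 0, _, _, visited => (false, visited)
  | fuel+1, r, c, visited =>
    if r < 0 ∨ n ≤ r ∨ c < 0 ∨ m ≤ c then (true, visited)
    else if gridGet g r c ≠ '.' then (false, visited)
    else
      offsP.foldl (fun st off =>
        if (r + off.1, c + off.2) ∈ st.2 then st
        else
          let out := dfsA g n m fuel (r + off.1) (c + off.2) st.2
          (st.1 || out.1, out.2))
        (false, PySem.Set.add visited (r, c))

/-- A's `can_remove` loop: `for offset in …: if dfs(…): return True` -/
def canRemoveLoop (g : List (List Char)) (n m : Int) (fuel : Nat) (r c : Int) :
    List (Int × Int) → PySem.Set (Int × Int) → Bool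
  | [], _ => false
  | off :: rest, visited =>
    let out := dfsA g n m fuel (r + off.1) (c + off.2) visited
    if out.1 then true else canRemoveLoop g n m fuel r c rest out.2

def canRemoveA (g : List (List Char)) (n m : Int) (r c : Int) : Bool :=
  canRemoveLoop g n m ((n * m).toNat + 2) r c offsP (PySem.Set.ofList [(r, c)])

/-- one request of A's main loop -/
def stepA (n m : Int) (st : List (List Char) × Int) (request : String) :
    List (List Char) × Int :=
  let g := st.1
  let force : Bool := request.toList.length == 2
  let target : Char := PySem.List.pyGetD request.toList 0 ' '
  let queue := (PySem.List.pyRange 0 n 1).foldl (fun acc r =>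
      (PySem.List.pyRange 0 m 1).foldl (fun acc c =>
        if gridGet g r c == target && (force || canRemoveA g n m r c)
        then acc ++ [(r, c)] else acc) acc) ([] : List (Int × Int))
  (queue.foldl (fun gg p => setCell gg p.1 p.2 '.') g, st.2 - (queue.length : Int))

def solution (storage : List String) (requests : List String) : Int :=
  let n : Int := storage.length
  let m : Int := (PySem.List.pyGetD storage 0 "").toList.length
  (requests.foldl (stepA n m) (storage.map (fun row => row.toList), n * m)).2

-- ===== PORT B =====

/-- `[(r, c) for r in range(n) for c in range(m)]` -/
def cellsRC (n m : Int) : List (Int × Int) :=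
  (PySem.List.pyRange 0 n 1).flatMap (fun r =>
    (PySem.List.pyRange 0 m 1).map (fun c => (r, c)))

/-- B's `any(outside(r+dr, c+dc) or (r+dr, c+dc) in reach for dr, dc in offsets)` -/
def nbrOkB (n m : Int) (reach : List (Int × Int)) (p : Int × Int) : Bool :=
  offsP.any (fun o =>
    !(decide (0 ≤ p.1 + o.1 ∧ p.1 + o.1 < n ∧ 0 ≤ p.2 + o.2 ∧ p.2 + o.2 < m)) ||
    decide ((p.1 + o.1, p.2 + o.2) ∈ reach))

/-- one of B's marking passes over a given traversal order of the cells -/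
def sweepB (g : List (List Char)) (n m : Int) (cells : List (Int × Int))
    (reach : PySem.Set (Int × Int)) : PySem.Set (Int × Int) :=
  cells.foldl (fun s p =>
    if gridGet g p.1 p.2 == '.' && nbrOkB n m s p then PySem.Set.add s p else s) reach

/-- B's `while True` fixpoint loop: a forward and a reverse sweep, repeated until
nothing new is marked (the fuel only makes it structural; the call site passes
enough, as the proofs show). -/
def reachIter (g : List (List Char)) (n m : Int) :
    Nat → PySem.Set (Int × Int) → PySem.Set (Int × Int)
  | 0, reach => reach
  | fuel+1, reach =>
    let grown := sweepB g n m (cellsRC n m).reverse (sweepB g n m (cellsRC n m) reach)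
    if grown.length == reach.length then reach else reachIter g n m fuel grown

/-- one request of B's main loop -/
def stepB (n m : Int) (st : List (List Char) × Int) (request : String) :
    List (List Char) × Int :=
  let g := st.1
  let force : Bool := request.toList.length == 2
  let target : Char := PySem.List.pyGetD request.toList 0 ' '
  let cand : List (Int × Int) :=
    (cellsRC n m).filter (fun p => gridGet g p.1 p.2 == target)
  let removed : List (Int × Int) :=
    if force then cand
    else if cand.isEmpty then []
    else
      let reach := reachIter g n m ((n * m).toNat + 2) PySem.Set.empty
      cand.filter (fun p => nbrOkB n m reach p)
  (removed.foldl (fun gg p => setCell gg p.1 p.2 '.') g, st.2 - (removed.length : Int))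

def solution_alt (storage : List String) (requests : List String) : Int :=
  let n : Int := storage.length
  let m : Int := (PySem.List.pyGetD storage 0 "").toList.length
  (requests.foldl (stepB n m) (storage.map (fun row => row.toList), n * m)).2

-- ===== PRECONDITION & SPEC =====

-- Pre_ excludes exactly the inputs where the Python A raises IndexError: an empty
-- storage (storage[0]), an empty request string (request[0]), and — when there is
-- at least one request — a row shorter than the first row (scanning the grid).
def Pre_solution (storage : List String) (requests : List String) : Prop :=
  storage ≠ [] ∧ (∀ req ∈ requests, req ≠ "") ∧
  (requests = [] ∨ ∀ row ∈ storage,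
    (storage.headD "").toList.length ≤ row.toList.length)

instance (storage : List String) (requests : List String) :
    Decidable (Pre_solution storage requests) := by unfold Pre_solution; infer_instance

def pvWitness_solution : List String × List String := (["A.", "BB"], ["A"])

def Spec_solution (storage : List String) (requests : List String) (out : Int) : Prop :=
  out = solution_alt storage requests
instance (storage : List String) (requests : List String) (out : Int) :
    Decidable (Spec_solution storage requests out) := by unfold Spec_solution; infer_instance

-- ===== CLAIM (what is proved, stated in full; the proofs are below) =====
def Claim_equal_solution : Prop := ∀ (storage : List String) (requests : List String),
  Dom_solution storage requests → Pre_solution storage requests →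
  Spec_solution storage requests (solution storage requests)

-- ===== LEMMAS AND PROOFS =====

-- Abstract notions the two ports are related through.

def InB (n m : Int) (p : Int × Int) : Prop := 0 ≤ p.1 ∧ p.1 < n ∧ 0 ≤ p.2 ∧ p.2 < m

def EmptyAt (g : List (List Char)) (p : Int × Int) : Prop := gridGet g p.1 p.2 = '.'

def nbrsOf (p : Int × Int) : List (Int × Int) := offsP.map (fun o => (p.1 + o.1, p.2 + o.2))

/-- cell p can escape to the exterior through empty cells -/
inductive Esc (g : List (List Char)) (n m : Int) : Int × Int → Prop where
  | oob (p : Int × Int) : ¬ InB n m p → Esc g n m p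
  | step (p q : Int × Int) : InB n m p → EmptyAt g p → q ∈ nbrsOf p →
      Esc g n m q → Esc g n m p

/-- p's neighbourhood is closed into S: no exit, every empty neighbour inside -/
def Good (g : List (List Char)) (n m : Int) (S : List (Int × Int)) (p : Int × Int) : Prop :=
  ∀ q ∈ nbrsOf p, InB n m q ∧ (EmptyAt g q → q ∈ S)

def allCells (n m : Int) : List (Int × Int) :=
  (List.range n.toNat).flatMap (fun i => (List.range m.toNat).map (fun j => ((i : Int), (j : Int))))

def freeCount (n m : Int) (V : List (Int × Int)) : Nat :=
  ((allCells n m).filter (fun p => decide (p ∉ V))).length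

lemma mem_allCells (n m : Int) (p : Int × Int) : p ∈ allCells n m ↔ InB n m p := by
  obtain ⟨a, b⟩ := p
  simp only [allCells, List.mem_flatMap, List.mem_map, InB, Prod.mk.injEq]
  constructor
  · rintro ⟨i, hi, j, hj, rfl, rfl⟩
    simp only [List.pure_def, List.bind_eq_flatMap, List.mem_flatMap,
      List.mem_singleton, List.mem_range] at hi hj
    obtain ⟨i', hi', rfl⟩ := hi
    obtain ⟨j', hj', rfl⟩ := hj
    refine ⟨by omega, by omega, by omega, by omega⟩
  · rintro ⟨h1, h2, h3, h4⟩
    refine ⟨a, ?_, b, ?_, rfl, rfl⟩ <;>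
      simp only [List.pure_def, List.bind_eq_flatMap, List.mem_flatMap,
        List.mem_singleton, List.mem_range] <;>
      [exact ⟨a.toNat, by omega, by omega⟩; exact ⟨b.toNat, by omega, by omega⟩]

lemma freeCount_le (n m : Int) (V : List (Int × Int)) : freeCount n m V ≤ (n * m).toNat := by
  have h1 : freeCount n m V ≤ (allCells n m).length := List.length_filter_le _ _
  have h2 : (allCells n m).length = n.toNat * m.toNat := by
    simp [allCells, List.length_flatMap]
  have h3 : n.toNat * m.toNat ≤ (n * m).toNat := by
    rcases (by omega : n ≤ 0 ∨ 0 < n) with hn | hn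
    · have hn' : n.toNat = 0 := by omega
      simp [hn']
    rcases (by omega : m ≤ 0 ∨ 0 < m) with hm | hm
    · have hm' : m.toNat = 0 := by omega
      simp [hm']
    · have hnm : n * m = ((n.toNat * m.toNat : Nat) : Int) := by
        push_cast
        rw [Int.toNat_of_nonneg (by omega), Int.toNat_of_nonneg (by omega)]
      have h4 : (n * m).toNat = n.toNat * m.toNat := by
        rw [hnm, Int.toNat_natCast]
      omega
  omega

lemma freeCount_antitone (n m : Int) {V W : List (Int × Int)} (h : ∀ x ∈ V, x ∈ W) :
    freeCount n m W ≤ freeCount n m V := by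
  apply List.Sublist.length_le
  apply List.monotone_filter_right
  intro x hx
  simp only [decide_eq_true_eq] at hx ⊢
  exact fun hxV => hx (h x hxV)

lemma freeCount_add_lt (n m : Int) (V : PySem.Set (Int × Int)) (p : Int × Int)
    (hin : InB n m p) (hnot : p ∉ V) :
    freeCount n m (PySem.Set.add V p) < freeCount n m V := by
  have hre : (allCells n m).filter (fun x => decide (x ∉ PySem.Set.add V p))
      = ((allCells n m).filter (fun x => decide (x ∉ V))).filter (fun x => decide (x ≠ p)) := by
    rw [List.filter_filter]
    apply List.filter_congr
    intro x _
    by_cases h1 : x ∈ V <;> by_cases h2 : x = p <;>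
      simp [PySem.Set.mem_add, h1, h2]
  have hmem : p ∈ (allCells n m).filter (fun x => decide (x ∉ V)) := by
    rw [List.mem_filter]
    exact ⟨(mem_allCells n m p).mpr hin, by simpa using hnot⟩
  unfold freeCount
  rw [hre]
  apply lt_of_le_of_ne (List.length_filter_le _ _)
  intro heq
  have := (List.length_filter_eq_length_iff).mp heq p hmem
  simp at this

lemma mem_nbrsOf (p q : Int × Int) :
    q ∈ nbrsOf p ↔ ∃ off ∈ offsP, q = (p.1 + off.1, p.2 + off.2) := by
  simp [nbrsOf, List.mem_map, eq_comm]

lemma esc_empty {g : List (List Char)} {n m : Int} {q : Int × Int}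
    (h : Esc g n m q) (hin : InB n m q) : EmptyAt g q := by
  cases h with
  | oob _ h' => exact absurd hin h'
  | step _ _ _ he _ _ => exact he

/-- a closed set admits no escape -/
lemma closed_noEsc {g : List (List Char)} {n m : Int} {S : List (Int × Int)}
    (hS : ∀ p ∈ S, EmptyAt g p → InB n m p ∧ Good g n m S p) :
    ∀ p, Esc g n m p → p ∈ S → EmptyAt g p → False := by
  intro p hesc
  induction hesc with
  | oob p hob =>
    intro hpS hpe
    exact hob (hS p hpS hpe).1
  | step p q hin he hq hescq ih =>
    intro hpS hpe
    obtain ⟨hqin, hqmem⟩ := (hS p hpS hpe).2 q hq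
    by_cases hqe : EmptyAt g q
    · exact ih (hqmem hqe) hqe
    · cases hescq with
      | oob _ hob => exact hob hqin
      | step _ _ _ he' _ _ => exact hqe he'

-- ----- A-side: dfs lemmas -----

/-- the body of A's neighbour loop, named for the proofs -/
def dstep (g : List (List Char)) (n m : Int) (fuel : Nat) (r c : Int) :
    (Bool × PySem.Set (Int × Int)) → (Int × Int) → Bool × PySem.Set (Int × Int) :=
  fun st off =>
    if (r + off.1, c + off.2) ∈ st.2 then st
    else
      let out := dfsA g n m fuel (r + off.1) (c + off.2) st.2
      (st.1 || out.1, out.2)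

lemma dfsA_succ (g : List (List Char)) (n m : Int) (fuel : Nat) (r c : Int)
    (V : PySem.Set (Int × Int)) :
    dfsA g n m (fuel + 1) r c V =
      if r < 0 ∨ n ≤ r ∨ c < 0 ∨ m ≤ c then (true, V)
      else if gridGet g r c ≠ '.' then (false, V)
      else offsP.foldl (dstep g n m fuel r c) (false, PySem.Set.add V (r, c)) := rfl

lemma good_mono {g : List (List Char)} {n m : Int} {S S' : List (Int × Int)}
    {p : Int × Int} (h : Good g n m S p) (hs : ∀ x ∈ S, x ∈ S') : Good g n m S' p := by
  intro q hq
  exact ⟨(h q hq).1, fun he => hs q ((h q hq).2 he)⟩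

lemma dloop_sub (g : List (List Char)) (n m : Int) (fuel : Nat) (r c : Int)
    (hIH : ∀ (r' c' : Int) (V' : PySem.Set (Int × Int)),
      (∀ x ∈ V', x ∈ (dfsA g n m fuel r' c' V').2) ∧
      (∀ p ∈ (dfsA g n m fuel r' c' V').2, p ∈ V' ∨ (InB n m p ∧ EmptyAt g p))) :
    ∀ (offs : List (Int × Int)) (st : Bool × PySem.Set (Int × Int)),
      (∀ x ∈ st.2, x ∈ (offs.foldl (dstep g n m fuel r c) st).2) ∧
      (∀ p ∈ (offs.foldl (dstep g n m fuel r c) st).2,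
        p ∈ st.2 ∨ (InB n m p ∧ EmptyAt g p)) := by
  intro offs
  induction offs with
  | nil => exact fun st => ⟨fun x hx => hx, fun p hp => Or.inl hp⟩
  | cons off rest ih =>
    intro st
    simp only [List.foldl_cons]
    by_cases hq : (r + off.1, c + off.2) ∈ st.2
    · rw [show dstep g n m fuel r c st off = st by simp [dstep, hq]]
      exact ih st
    · rw [show dstep g n m fuel r c st off =
        ((st.1 || (dfsA g n m fuel (r + off.1) (c + off.2) st.2).1),
          (dfsA g n m fuel (r + off.1) (c + off.2) st.2).2) by simp [dstep, hq]]
      obtain ⟨hmono, hchar⟩ := hIH (r + off.1) (c + off.2) st.2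
      obtain ⟨hmono', hchar'⟩ := ih ((st.1 || (dfsA g n m fuel (r + off.1) (c + off.2) st.2).1),
        (dfsA g n m fuel (r + off.1) (c + off.2) st.2).2)
      refine ⟨fun x hx => hmono' x (hmono x hx), fun p hp => ?_⟩
      rcases hchar' p hp with h | h
      · exact hchar p h
      · exact Or.inr h

lemma dfsA_sub (g : List (List Char)) (n m : Int) :
    ∀ (fuel : Nat) (r c : Int) (V : PySem.Set (Int × Int)),
      (∀ x ∈ V, x ∈ (dfsA g n m fuel r c V).2) ∧
      (∀ p ∈ (dfsA g n m fuel r c V).2, p ∈ V ∨ (InB n m p ∧ EmptyAt g p)) := by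
  intro fuel
  induction fuel with
  | zero => exact fun r c V => ⟨fun x hx => hx, fun p hp => Or.inl hp⟩
  | succ fuel ih =>
    intro r c V
    rw [dfsA_succ]
    split_ifs with h1 h2
    · exact ⟨fun x hx => hx, fun p hp => Or.inl hp⟩
    · exact ⟨fun x hx => hx, fun p hp => Or.inl hp⟩
    · obtain ⟨hmono, hchar⟩ := dloop_sub g n m fuel r c ih offsP
        (false, PySem.Set.add V (r, c))
      refine ⟨fun x hx => hmono x (by simpa [PySem.Set.mem_add] using Or.inl hx), fun p hp => ?_⟩
      rcases hchar p hp with h | h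
      · rcases (PySem.Set.mem_add V (r, c) p).mp h with h' | h'
        · exact Or.inl h'
        · subst h'
          refine Or.inr ⟨⟨?_, ?_, ?_, ?_⟩, ?_⟩ <;>
            first
            | (simp only [EmptyAt]; simpa using h2)
            | omega
      · exact Or.inr h

lemma dfsA_oob (g : List (List Char)) (n m : Int) (fuel : Nat) (r c : Int)
    (V : PySem.Set (Int × Int)) (h : ¬ InB n m (r, c)) (hf : 1 ≤ fuel) :
    (dfsA g n m fuel r c V).1 = true := by
  obtain ⟨fuel, rfl⟩ : ∃ f, fuel = f + 1 := ⟨fuel - 1, by omega⟩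
  rw [dfsA_succ, if_pos (by simp only [InB] at h; omega)]

lemma dfsA_self (g : List (List Char)) (n m : Int) (fuel : Nat) (r c : Int)
    (V : PySem.Set (Int × Int)) (hin : InB n m (r, c)) (he : EmptyAt g (r, c))
    (hf : 1 ≤ fuel) : (r, c) ∈ (dfsA g n m fuel r c V).2 := by
  obtain ⟨fuel, rfl⟩ : ∃ f, fuel = f + 1 := ⟨fuel - 1, by omega⟩
  rw [dfsA_succ, if_neg (by simp only [InB] at hin; omega),
    if_neg (by simpa [EmptyAt] using he)]
  exact (dloop_sub g n m fuel r c (fun r' c' V' => dfsA_sub g n m fuel r' c' V') offsP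
    (false, PySem.Set.add V (r, c))).1 (r, c)
    ((PySem.Set.mem_add V (r, c) (r, c)).mpr (Or.inr rfl))

lemma dfsA_sound (g : List (List Char)) (n m : Int) :
    ∀ (fuel : Nat) (r c : Int) (V : PySem.Set (Int × Int)),
      (dfsA g n m fuel r c V).1 = true → Esc g n m (r, c) := by
  intro fuel
  induction fuel with
  | zero => intro r c V h; simp [dfsA] at h
  | succ fuel ih =>
    intro r c V
    rw [dfsA_succ]
    split_ifs with h1 h2
    · intro _
      exact Esc.oob _ (by simp only [InB]; omega)
    · intro h
      simp at h
    · -- loop case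
      intro h
      have hloop : ∀ (offs : List (Int × Int)) (st : Bool × PySem.Set (Int × Int)),
          (offs.foldl (dstep g n m fuel r c) st).1 = true →
          st.1 = true ∨ ∃ off ∈ offs, Esc g n m (r + off.1, c + off.2) := by
        intro offs
        induction offs with
        | nil => exact fun st h' => Or.inl h'
        | cons off rest ih' =>
          intro st hh
          simp only [List.foldl_cons] at hh
          by_cases hq : (r + off.1, c + off.2) ∈ st.2
          · rw [show dstep g n m fuel r c st off = st by simp [dstep, hq]] at hh
            rcases ih' st hh with h' | ⟨o, ho, he⟩
            · exact Or.inl h'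
            · exact Or.inr ⟨o, List.mem_cons_of_mem _ ho, he⟩
          · rw [show dstep g n m fuel r c st off =
              ((st.1 || (dfsA g n m fuel (r + off.1) (c + off.2) st.2).1),
                (dfsA g n m fuel (r + off.1) (c + off.2) st.2).2) by simp [dstep, hq]] at hh
            rcases ih' _ hh with h' | ⟨o, ho, he⟩
            · rcases Bool.or_eq_true_iff.mp h' with h'' | h''
              · exact Or.inl h''
              · exact Or.inr ⟨off, List.mem_cons_self, ih (r + off.1) (c + off.2) st.2 h''⟩
            · exact Or.inr ⟨o, List.mem_cons_of_mem _ ho, he⟩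
      rcases hloop offsP (false, PySem.Set.add V (r, c)) h with h' | ⟨off, hoff, hesc⟩
      · simp at h'
      · refine Esc.step _ _ (by simp only [InB]; omega) (by simpa [EmptyAt] using h2) ?_ hesc
        exact (mem_nbrsOf _ _).mpr ⟨off, hoff, rfl⟩

lemma dloop_closed (g : List (List Char)) (n m : Int) (fuel : Nat) (r c : Int)
    (hIH : ∀ (r' c' : Int) (V' : PySem.Set (Int × Int)),
      (∀ x ∈ V', InB n m x) →
      freeCount n m V' + (if (r', c') ∈ V' then 1 else 0) < fuel →
      (dfsA g n m fuel r' c' V').1 = false →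
      ∀ p ∈ (dfsA g n m fuel r' c' V').2, p ∉ V' →
        Good g n m (dfsA g n m fuel r' c' V').2 p) :
    ∀ (offs : List (Int × Int)) (st : Bool × PySem.Set (Int × Int)),
      (∀ x ∈ st.2, InB n m x) →
      freeCount n m st.2 < fuel →
      (offs.foldl (dstep g n m fuel r c) st).1 = false →
      st.1 = false ∧
      (∀ p ∈ (offs.foldl (dstep g n m fuel r c) st).2, p ∉ st.2 →
        Good g n m (offs.foldl (dstep g n m fuel r c) st).2 p) ∧
      (∀ off ∈ offs, InB n m (r + off.1, c + off.2) ∧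
        (EmptyAt g (r + off.1, c + off.2) →
          (r + off.1, c + off.2) ∈ (offs.foldl (dstep g n m fuel r c) st).2)) := by
  intro offs
  induction offs with
  | nil =>
    intro st _ _ hfalse
    exact ⟨hfalse, fun p hp hnp => absurd hp hnp, by simp⟩
  | cons off rest ih =>
    intro st hVin hfuel hfalse
    simp only [List.foldl_cons] at hfalse ⊢
    by_cases hq : (r + off.1, c + off.2) ∈ st.2
    · rw [show dstep g n m fuel r c st off = st by simp [dstep, hq]] at hfalse ⊢
      obtain ⟨h1, h2, h3⟩ := ih st hVin hfuel hfalse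
      refine ⟨h1, h2, ?_⟩
      intro o ho
      rcases List.mem_cons.mp ho with rfl | ho'
      · exact ⟨hVin _ hq, fun _ =>
          (dloop_sub g n m fuel r c (fun a b C => dfsA_sub g n m fuel a b C) rest st).1 _ hq⟩
      · exact h3 o ho'
    · set out := dfsA g n m fuel (r + off.1) (c + off.2) st.2 with hout
      rw [show dstep g n m fuel r c st off = ((st.1 || out.1), out.2) by
        simp [dstep, hq, hout]] at hfalse ⊢
      obtain ⟨hmono, hchar⟩ := dfsA_sub g n m fuel (r + off.1) (c + off.2) st.2
      have hVin' : ∀ x ∈ out.2, InB n m x := by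
        intro x hx
        rcases hchar x hx with h | h
        · exact hVin x h
        · exact h.1
      have hfuel' : freeCount n m out.2 < fuel :=
        lt_of_le_of_lt (freeCount_antitone n m hmono) hfuel
      obtain ⟨h1, h2, h3⟩ := ih ((st.1 || out.1), out.2) hVin' hfuel' hfalse
      have hst1 : st.1 = false := by
        rcases Bool.or_eq_false_iff.mp h1 with ⟨ha, _⟩
        exact ha
      have hout1 : out.1 = false := (Bool.or_eq_false_iff.mp h1).2
      have hsub' : ∀ x ∈ out.2,
          x ∈ (rest.foldl (dstep g n m fuel r c) ((st.1 || out.1), out.2)).2 :=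
        (dloop_sub g n m fuel r c (fun a b C => dfsA_sub g n m fuel a b C) rest
          ((st.1 || out.1), out.2)).1
      have hInBq : InB n m (r + off.1, c + off.2) := by
        by_contra hnb
        rw [dfsA_oob g n m fuel _ _ _ hnb (by omega)] at hout1
        simp at hout1
      refine ⟨hst1, ?_, ?_⟩
      · intro p hp hnp
        by_cases hpo : p ∈ out.2
        · have hgood : Good g n m out.2 p := by
            apply hIH (r + off.1) (c + off.2) st.2 hVin ?_ hout1 p hpo hnp
            rw [if_neg hq]
            omega
          exact good_mono hgood hsub'
        · exact h2 p hp hpo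
      · intro o ho
        rcases List.mem_cons.mp ho with rfl | ho'
        · refine ⟨hInBq, fun he => ?_⟩
          exact hsub' _ (dfsA_self g n m fuel _ _ st.2 hInBq he (by omega))
        · exact h3 o ho'

lemma dfsA_closed (g : List (List Char)) (n m : Int) :
    ∀ (fuel : Nat) (r c : Int) (V : PySem.Set (Int × Int)),
      (∀ x ∈ V, InB n m x) →
      freeCount n m V + (if (r, c) ∈ V then 1 else 0) < fuel →
      (dfsA g n m fuel r c V).1 = false →
      ∀ p ∈ (dfsA g n m fuel r c V).2, p ∉ V → Good g n m (dfsA g n m fuel r c V).2 p := by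
  intro fuel
  induction fuel with
  | zero => intro r c V _ hfuel; omega
  | succ fuel ih =>
    intro r c V hVin hfuel
    rw [dfsA_succ]
    split_ifs with h1 h2
    · intro h; simp at h
    · intro _ p hp hnp; exact absurd hp hnp
    · have hin : InB n m (r, c) := by simp only [InB]; omega
      have hemp : EmptyAt g (r, c) := by simpa [EmptyAt] using h2
      intro hfalse p hp hnp
      by_cases hc : (r, c) ∈ V
      · have hVeq : PySem.Set.add V (r, c) = V := PySem.Set.add_of_mem hc
        rw [hVeq] at hfalse hp ⊢
        have hfuel' : freeCount n m V < fuel := by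
          rw [if_pos hc] at hfuel; omega
        obtain ⟨_, h2', _⟩ := dloop_closed g n m fuel r c ih offsP (false, V)
          hVin hfuel' hfalse
        exact h2' p hp hnp
      · have hVin1 : ∀ x ∈ PySem.Set.add V (r, c), InB n m x := by
          intro x hx
          rcases (PySem.Set.mem_add V (r, c) x).mp hx with h | h
          · exact hVin x h
          · subst h; exact hin
        have hfuel1 : freeCount n m (PySem.Set.add V (r, c)) < fuel := by
          have := freeCount_add_lt n m V (r, c) hin hc
          rw [if_neg hc] at hfuel
          omega
        obtain ⟨_, h2', h3'⟩ := dloop_closed g n m fuel r c ih offsP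
          (false, PySem.Set.add V (r, c)) hVin1 hfuel1 hfalse
        by_cases hpc : p = (r, c)
        · subst hpc
          intro q hqn
          obtain ⟨o, ho, rfl⟩ := (mem_nbrsOf _ _).mp hqn
          exact h3' o ho
        · apply h2' p hp
          intro hmem
          rcases (PySem.Set.mem_add V (r, c) p).mp hmem with h | h
          · exact hnp h
          · exact hpc h

-- ----- A-side: can_remove characterisation -----

lemma canRemoveLoop_sound (g : List (List Char)) (n m : Int) (fuel : Nat) (r c : Int) :
    ∀ (offs : List (Int × Int)) (V : PySem.Set (Int × Int)),
      canRemoveLoop g n m fuel r c offs V = true →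
      ∃ off ∈ offs, Esc g n m (r + off.1, c + off.2) := by
  intro offs
  induction offs with
  | nil => intro V h; simp [canRemoveLoop] at h
  | cons off rest ih =>
    intro V h
    simp only [canRemoveLoop] at h
    by_cases h1 : (dfsA g n m fuel (r + off.1) (c + off.2) V).1 = true
    · exact ⟨off, List.mem_cons_self, dfsA_sound g n m fuel _ _ V h1⟩
    · rw [if_neg h1] at h
      obtain ⟨o, ho, he⟩ := ih _ h
      exact ⟨o, List.mem_cons_of_mem _ ho, he⟩

lemma canRemoveLoop_false (g : List (List Char)) (n m : Int) (fuel : Nat) (r c : Int) :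
    ∀ (offs : List (Int × Int)) (V : PySem.Set (Int × Int)),
      (∀ x ∈ V, InB n m x) →
      freeCount n m V + 1 < fuel →
      canRemoveLoop g n m fuel r c offs V = false →
      ∃ S : List (Int × Int),
        (∀ x ∈ V, x ∈ S) ∧
        (∀ p ∈ S, p ∈ V ∨ (InB n m p ∧ EmptyAt g p)) ∧
        (∀ p ∈ S, p ∉ V → Good g n m S p) ∧
        (∀ off ∈ offs, InB n m (r + off.1, c + off.2) ∧
          (EmptyAt g (r + off.1, c + off.2) → (r + off.1, c + off.2) ∈ S)) := by
  intro offs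
  induction offs with
  | nil =>
    intro V hVin _ _
    exact ⟨V, fun x hx => hx, fun p hp => Or.inl hp,
      fun p hp hnp => absurd hp hnp, by simp⟩
  | cons off rest ih =>
    intro V hVin hfuel hfalse
    simp only [canRemoveLoop] at hfalse
    set out := dfsA g n m fuel (r + off.1) (c + off.2) V with hout
    have hout1 : out.1 = false := by
      by_contra h
      rw [if_pos (by simpa using h)] at hfalse
      simp at hfalse
    rw [if_neg (by simp [hout1])] at hfalse
    obtain ⟨hmono, hchar⟩ := dfsA_sub g n m fuel (r + off.1) (c + off.2) V
    have hVin' : ∀ x ∈ out.2, InB n m x := by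
      intro x hx
      rcases hchar x hx with h | h
      · exact hVin x h
      · exact h.1
    have hfuel' : freeCount n m out.2 + 1 < fuel := by
      have h := freeCount_antitone n m hmono
      rw [← hout] at h
      omega
    obtain ⟨S, hS1, hS2, hS3, hS4⟩ := ih out.2 hVin' hfuel' hfalse
    have hVS : ∀ x ∈ V, x ∈ S := fun x hx => hS1 x (hmono x hx)
    have hInBq : InB n m (r + off.1, c + off.2) := by
      by_contra hnb
      rw [dfsA_oob g n m fuel _ _ _ hnb (by omega)] at hout1
      simp at hout1
    refine ⟨S, hVS, ?_, ?_, ?_⟩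
    · intro p hp
      rcases hS2 p hp with h | h
      · rcases hchar p h with h' | h'
        · exact Or.inl h'
        · exact Or.inr h'
      · exact Or.inr h
    · intro p hp hnp
      by_cases hpo : p ∈ out.2
      · by_cases hpv : p ∈ V
        · exact absurd hpv hnp
        · have hgood : Good g n m out.2 p := by
            apply dfsA_closed g n m fuel (r + off.1) (c + off.2) V hVin ?_ hout1 p hpo hpv
            split_ifs <;> omega
          exact good_mono hgood hS1
      · exact hS3 p hp hpo
    · intro o ho
      rcases List.mem_cons.mp ho with rfl | ho'
      · exact ⟨hInBq, fun he =>
          hS1 _ (dfsA_self g n m fuel _ _ V hInBq he (by omega))⟩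
      · exact hS4 o ho'

/-- the box or cell at p touches the outside or an escaping empty cell -/
def Exposing (g : List (List Char)) (n m : Int) (p : Int × Int) : Prop :=
  ∃ q ∈ nbrsOf p, ¬ InB n m q ∨ (EmptyAt g q ∧ Esc g n m q)

lemma canRemoveA_iff (g : List (List Char)) (n m : Int) (r c : Int)
    (hin : InB n m (r, c)) :
    canRemoveA g n m r c = true ↔ Exposing g n m (r, c) := by
  have hV0 : PySem.Set.ofList [(r, c)] = [(r, c)] := rfl
  unfold canRemoveA
  rw [hV0]
  constructor
  · intro h
    obtain ⟨off, ho, hesc⟩ := canRemoveLoop_sound g n m _ r c offsP [(r, c)] h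
    refine ⟨(r + off.1, c + off.2), (mem_nbrsOf _ _).mpr ⟨off, ho, rfl⟩, ?_⟩
    by_cases hq : InB n m (r + off.1, c + off.2)
    · exact Or.inr ⟨esc_empty hesc hq, hesc⟩
    · exact Or.inl hq
  · intro hexp
    by_contra h
    rw [Bool.not_eq_true] at h
    have hVin : ∀ x ∈ ([(r, c)] : List (Int × Int)), InB n m x := by
      intro x hx
      simp only [List.mem_singleton] at hx
      subst hx
      exact hin
    have hfuel : freeCount n m [(r, c)] + 1 < (n * m).toNat + 2 := by
      have := freeCount_le n m [(r, c)]
      omega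
    obtain ⟨S, hS1, hS2, hS3, hS4⟩ :=
      canRemoveLoop_false g n m _ r c offsP [(r, c)] hVin hfuel h
    have hS' : ∀ p ∈ S, EmptyAt g p → InB n m p ∧ Good g n m S p := by
      intro p hp hpe
      by_cases hpc : p = (r, c)
      · subst hpc
        refine ⟨hin, ?_⟩
        intro q hq
        obtain ⟨off, ho, rfl⟩ := (mem_nbrsOf _ _).mp hq
        exact hS4 off ho
      · have hpV : p ∉ ([(r, c)] : List (Int × Int)) := by
          simp only [List.mem_singleton]
          exact hpc
        have hInB : InB n m p := by
          rcases hS2 p hp with h' | h'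
          · exact absurd h' hpV
          · exact h'.1
        exact ⟨hInB, hS3 p hp hpV⟩
    obtain ⟨q, hq, hcase⟩ := hexp
    obtain ⟨off, ho, rfl⟩ := (mem_nbrsOf _ _).mp hq
    obtain ⟨hqin, hqmem⟩ := hS4 off ho
    rcases hcase with hob | ⟨hqe, hqesc⟩
    · exact hob hqin
    · exact closed_noEsc hS' _ hqesc (hqmem hqe) hqe

-- ----- B-side: the cell list -----

lemma mem_cellsRC (n m : Int) (p : Int × Int) : p ∈ cellsRC n m ↔ InB n m p := by
  obtain ⟨a, b⟩ := p
  simp only [cellsRC, List.mem_flatMap, List.mem_map, PySem.List.mem_pyRange_one,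
    InB, Prod.mk.injEq]
  constructor
  · rintro ⟨r, ⟨hr0, hrn⟩, c, ⟨hc0, hcm⟩, rfl, rfl⟩
    exact ⟨hr0, hrn, hc0, hcm⟩
  · rintro ⟨h1, h2, h3, h4⟩
    exact ⟨a, ⟨h1, h2⟩, b, ⟨h3, h4⟩, rfl, rfl⟩

lemma length_cellsRC (n m : Int) : (cellsRC n m).length = n.toNat * m.toNat := by
  simp [cellsRC, List.length_flatMap, PySem.List.length_pyRange_one]

-- ----- A's per-request queue as a filter -----

lemma foldl_ite_append (q : Int → Bool) (f : Int → Int × Int)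
    (l : List Int) (init : List (Int × Int)) :
    l.foldl (fun acc x => if q x then acc ++ [f x] else acc) init =
      init ++ (l.filter q).map f := by
  induction l generalizing init with
  | nil => simp
  | cons x rest ih =>
    simp only [List.foldl_cons, List.filter_cons]
    by_cases h : q x = true
    · rw [if_pos h, ih]
      simp [h]
    · rw [if_neg h, ih]
      simp [h]

lemma filter_flatMap' {α β : Type} (l : List α) (f : α → List β) (p : β → Bool) :
    (l.flatMap f).filter p = l.flatMap (fun x => (f x).filter p) := by
  induction l with
  | nil => rfl
  | cons x rest ih => simp [List.flatMap_cons, List.filter_append, ih]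

lemma queueA_eq_filter (n m : Int) (cond : Int → Int → Bool) :
    (PySem.List.pyRange 0 n 1).foldl (fun acc r =>
        (PySem.List.pyRange 0 m 1).foldl (fun acc c =>
          if cond r c then acc ++ [(r, c)] else acc) acc) ([] : List (Int × Int)) =
      (cellsRC n m).filter (fun p => cond p.1 p.2) := by
  have inner : ∀ (r : Int) (acc : List (Int × Int)),
      (PySem.List.pyRange 0 m 1).foldl (fun acc c =>
        if cond r c then acc ++ [(r, c)] else acc) acc =
      acc ++ ((PySem.List.pyRange 0 m 1).map (fun c => (r, c))).filter
        (fun p => cond p.1 p.2) := by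
    intro r acc
    rw [foldl_ite_append (fun c => cond r c) (fun c => (r, c)),
      List.filter_map]
    simp [Function.comp_def]
  have outer : ∀ (rows : List Int) (acc : List (Int × Int)),
      rows.foldl (fun acc r => (PySem.List.pyRange 0 m 1).foldl (fun acc c =>
        if cond r c then acc ++ [(r, c)] else acc) acc) acc =
      acc ++ rows.flatMap (fun r =>
        ((PySem.List.pyRange 0 m 1).map (fun c => (r, c))).filter
          (fun p => cond p.1 p.2)) := by
    intro rows
    induction rows with
    | nil => simp
    | cons r rest ih =>
      intro acc
      simp only [List.foldl_cons, List.flatMap_cons]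
      rw [inner r acc, ih, List.append_assoc]
  rw [outer, List.nil_append, cellsRC, filter_flatMap']

-- ----- B-side: the reach fixpoint -----

lemma nbrOkB_iff (n m : Int) (R : List (Int × Int)) (p : Int × Int) :
    nbrOkB n m R p = true ↔
      ∃ o ∈ offsP, ¬ InB n m (p.1 + o.1, p.2 + o.2) ∨ (p.1 + o.1, p.2 + o.2) ∈ R := by
  simp only [nbrOkB, List.any_eq_true, Bool.or_eq_true, Bool.not_eq_true',
    decide_eq_false_iff_not, decide_eq_true_eq, InB]

lemma nbrOkB_mono (n m : Int) {R R' : List (Int × Int)} (h : ∀ x ∈ R, x ∈ R')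
    (p : Int × Int) (hp : nbrOkB n m R p = true) : nbrOkB n m R' p = true := by
  rw [nbrOkB_iff] at hp ⊢
  obtain ⟨o, ho, hc⟩ := hp
  refine ⟨o, ho, ?_⟩
  rcases hc with hc | hc
  · exact Or.inl hc
  · exact Or.inr (h _ hc)

/-- the body of B's sweep, named for the proofs -/
def swStep (g : List (List Char)) (n m : Int) :
    PySem.Set (Int × Int) → (Int × Int) → PySem.Set (Int × Int) :=
  fun s p => if gridGet g p.1 p.2 == '.' && nbrOkB n m s p then PySem.Set.add s p else s

lemma mem_swStep (g : List (List Char)) (n m : Int) (s : PySem.Set (Int × Int))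
    (p : Int × Int) {x : Int × Int} (hx : x ∈ s) : x ∈ swStep g n m s p := by
  unfold swStep
  split_ifs
  · exact (PySem.Set.mem_add s p x).mpr (Or.inl hx)
  · exact hx

lemma sweep_fold_supset (g : List (List Char)) (n m : Int) :
    ∀ (cells : List (Int × Int)) (s : PySem.Set (Int × Int)),
      ∀ x ∈ s, x ∈ cells.foldl (swStep g n m) s := by
  intro cells
  induction cells with
  | nil => exact fun s x hx => hx
  | cons p rest ih =>
    intro s x hx
    exact ih (swStep g n m s p) x (mem_swStep g n m s p hx)

lemma sweep_fold_sub (g : List (List Char)) (n m : Int) :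
    ∀ (cells : List (Int × Int)) (s : PySem.Set (Int × Int)),
      ∀ x ∈ cells.foldl (swStep g n m) s, x ∈ s ∨ (x ∈ cells ∧ EmptyAt g x) := by
  intro cells
  induction cells with
  | nil => exact fun s x hx => Or.inl hx
  | cons p rest ih =>
    intro s x hx
    rcases ih (swStep g n m s p) x hx with h | ⟨h1, h2⟩
    · unfold swStep at h
      split_ifs at h with hc
      · rcases (PySem.Set.mem_add s p x).mp h with h' | h'
        · exact Or.inl h'
        · subst h'
          refine Or.inr ⟨List.mem_cons_self, ?_⟩
          rw [Bool.and_eq_true, beq_iff_eq] at hc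
          exact hc.1
      · exact Or.inl h
    · exact Or.inr ⟨List.mem_cons_of_mem _ h1, h2⟩

lemma sweep_fold_nodup (g : List (List Char)) (n m : Int) :
    ∀ (cells : List (Int × Int)) (s : PySem.Set (Int × Int)),
      s.Nodup → (cells.foldl (swStep g n m) s).Nodup := by
  intro cells
  induction cells with
  | nil => exact fun s h => h
  | cons p rest ih =>
    intro s hs
    simp only [List.foldl_cons]
    apply ih
    unfold swStep
    split_ifs
    · first
      | exact PySem.Set.nodup_add hs
      | exact PySem.Set.nodup_add _ _ hs
    · exact hs

lemma sweep_fold_sound (g : List (List Char)) (n m : Int) :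
    ∀ (cells : List (Int × Int)) (s : PySem.Set (Int × Int)),
      (∀ p ∈ cells, InB n m p) →
      (∀ x ∈ s, InB n m x ∧ EmptyAt g x ∧ Esc g n m x) →
      ∀ x ∈ cells.foldl (swStep g n m) s, InB n m x ∧ EmptyAt g x ∧ Esc g n m x := by
  intro cells
  induction cells with
  | nil => exact fun s _ hs => hs
  | cons p rest ih =>
    intro s hcells hs
    simp only [List.foldl_cons]
    apply ih (swStep g n m s p) (fun q hq => hcells q (List.mem_cons_of_mem _ hq))
    intro x hx
    unfold swStep at hx
    split_ifs at hx with hc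
    · rcases (PySem.Set.mem_add s p x).mp hx with h | h
      · exact hs x h
      · subst h
        rw [Bool.and_eq_true, beq_iff_eq] at hc
        obtain ⟨hemp, hok⟩ := hc
        have hin : InB n m x := hcells x List.mem_cons_self
        refine ⟨hin, hemp, ?_⟩
        obtain ⟨o, ho, hcase⟩ := (nbrOkB_iff n m s x).mp hok
        have hq : (x.1 + o.1, x.2 + o.2) ∈ nbrsOf x := (mem_nbrsOf _ _).mpr ⟨o, ho, rfl⟩
        rcases hcase with h' | h'
        · exact Esc.step _ _ hin hemp hq (Esc.oob _ h')
        · exact Esc.step _ _ hin hemp hq (hs _ h').2.2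
    · exact hs x hx

lemma sweep_fold_complete (g : List (List Char)) (n m : Int)
    (R : List (Int × Int)) :
    ∀ (cells : List (Int × Int)) (s : PySem.Set (Int × Int)),
      (∀ y ∈ R, y ∈ s) →
      ∀ x ∈ cells, EmptyAt g x → nbrOkB n m R x = true →
        x ∈ cells.foldl (swStep g n m) s := by
  intro cells
  induction cells with
  | nil => intro s _ x hx; cases hx
  | cons p rest ih =>
    intro s hRs x hx hemp hok
    rcases List.mem_cons.mp hx with rfl | hx'
    · -- x is processed now: it is in the set afterwards
      simp only [List.foldl_cons]
      apply sweep_fold_supset g n m rest (swStep g n m s x) x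
      unfold swStep
      rw [if_pos]
      · exact (PySem.Set.mem_add s x x).mpr (Or.inr rfl)
      · rw [Bool.and_eq_true, beq_iff_eq]
        exact ⟨hemp, nbrOkB_mono n m hRs x hok⟩
    · simp only [List.foldl_cons]
      exact ih (swStep g n m s p)
        (fun y hy => mem_swStep g n m s p (hRs y hy)) x hx' hemp hok

lemma cellsRC_inB (n m : Int) : ∀ p ∈ cellsRC n m, InB n m p :=
  fun p hp => (mem_cellsRC n m p).mp hp

lemma cellsRC_rev_inB (n m : Int) : ∀ p ∈ (cellsRC n m).reverse, InB n m p :=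
  fun p hp => (mem_cellsRC n m p).mp (List.mem_reverse.mp hp)

lemma sweepB_eq (g : List (List Char)) (n m : Int) (cells : List (Int × Int))
    (reach : PySem.Set (Int × Int)) :
    sweepB g n m cells reach = cells.foldl (swStep g n m) reach := rfl

lemma reachIter_sound (g : List (List Char)) (n m : Int) :
    ∀ (fuel : Nat) (R : PySem.Set (Int × Int)),
      (∀ x ∈ R, InB n m x ∧ EmptyAt g x ∧ Esc g n m x) →
      ∀ x ∈ reachIter g n m fuel R, InB n m x ∧ EmptyAt g x ∧ Esc g n m x := by
  intro fuel
  induction fuel with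
  | zero => exact fun R hR => hR
  | succ fuel ih =>
    intro R hR
    show ∀ x ∈ (if (sweepB g n m (cellsRC n m).reverse (sweepB g n m (cellsRC n m) R)).length
        == R.length then R
      else reachIter g n m fuel (sweepB g n m (cellsRC n m).reverse (sweepB g n m (cellsRC n m) R))), _
    split_ifs with h
    · exact hR
    · refine ih _ ?_
      rw [sweepB_eq, sweepB_eq]
      exact sweep_fold_sound g n m (cellsRC n m).reverse _ (cellsRC_rev_inB n m)
        (sweep_fold_sound g n m (cellsRC n m) R (cellsRC_inB n m) hR)

lemma reachIter_fix (g : List (List Char)) (n m : Int) :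
    ∀ (fuel : Nat) (R : PySem.Set (Int × Int)), R.Nodup →
      (∀ x ∈ R, InB n m x) →
      n.toNat * m.toNat + 1 ≤ fuel + R.length →
      ∀ x, InB n m x → EmptyAt g x →
        nbrOkB n m (reachIter g n m fuel R) x = true →
        x ∈ reachIter g n m fuel R := by
  intro fuel
  induction fuel with
  | zero =>
    intro R hnd hinb hle
    exfalso
    have hsub : R ⊆ cellsRC n m := by
      intro x hx
      exact (mem_cellsRC n m x).mpr (hinb x hx)
    have := (hnd.subperm hsub).length_le
    rw [length_cellsRC] at this
    omega
  | succ fuel ih =>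
    intro R hnd hinb hle
    set G : PySem.Set (Int × Int) :=
      sweepB g n m (cellsRC n m).reverse (sweepB g n m (cellsRC n m) R) with hG
    have hGfold : G = (cellsRC n m).reverse.foldl (swStep g n m)
        ((cellsRC n m).foldl (swStep g n m) R) := rfl
    have hsup : ∀ y ∈ R, y ∈ G := by
      intro y hy
      rw [hGfold]
      exact sweep_fold_supset g n m (cellsRC n m).reverse _ y
        (sweep_fold_supset g n m (cellsRC n m) R y hy)
    have hndS : G.Nodup := by
      rw [hGfold]
      exact sweep_fold_nodup g n m (cellsRC n m).reverse _
        (sweep_fold_nodup g n m (cellsRC n m) R hnd)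
    have hsubperm : List.Subperm R G := hnd.subperm (fun y hy => hsup y hy)
    show ∀ x, InB n m x → EmptyAt g x →
        nbrOkB n m (if G.length == R.length then R else reachIter g n m fuel G) x = true →
        x ∈ (if G.length == R.length then R else reachIter g n m fuel G)
    split_ifs with hlen
    · -- the sweeps added nothing: R is a fixpoint
      rw [beq_iff_eq] at hlen
      have hperm : R.Perm G := hsubperm.perm_of_length_le (le_of_eq hlen)
      intro x hin hemp hok
      have hxG : x ∈ G := by
        rw [hGfold]
        apply sweep_fold_supset g n m (cellsRC n m).reverse _ x
        exact sweep_fold_complete g n m R (cellsRC n m) R (fun y hy => hy) x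
          ((mem_cellsRC n m x).mpr hin) hemp hok
      exact hperm.mem_iff.mpr hxG
    · rw [beq_iff_eq] at hlen
      have hlenS : R.length + 1 ≤ G.length := by
        have := hsubperm.length_le
        omega
      apply ih G hndS
      · intro x hx
        rw [hGfold] at hx
        rcases sweep_fold_sub g n m (cellsRC n m).reverse _ x hx with h | ⟨h, _⟩
        · rcases sweep_fold_sub g n m (cellsRC n m) R x h with h' | ⟨h', _⟩
          · exact hinb x h'
          · exact (mem_cellsRC n m x).mp h'
        · exact (mem_cellsRC n m x).mp (List.mem_reverse.mp h)
      · omega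

lemma fix_complete (g : List (List Char)) (n m : Int) (R : PySem.Set (Int × Int))
    (hfix : ∀ x, InB n m x → EmptyAt g x → nbrOkB n m R x = true → x ∈ R) :
    ∀ p, Esc g n m p → InB n m p → EmptyAt g p → p ∈ R := by
  intro p hesc
  induction hesc with
  | oob p hob => intro hin _; exact absurd hin hob
  | step p q hin he hq hescq ih =>
    intro _ hpe
    obtain ⟨o, ho, rfl⟩ := (mem_nbrsOf _ _).mp hq
    by_cases hqin : InB n m (p.1 + o.1, p.2 + o.2)
    · have hqe : EmptyAt g (p.1 + o.1, p.2 + o.2) := esc_empty hescq hqin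
      have hqR := ih hqin hqe
      exact hfix p hin hpe ((nbrOkB_iff n m R p).mpr ⟨o, ho, Or.inr hqR⟩)
    · exact hfix p hin hpe ((nbrOkB_iff n m R p).mpr ⟨o, ho, Or.inl hqin⟩)

lemma reach_char (g : List (List Char)) (n m : Int) (hn : 0 ≤ n) (hm : 0 ≤ m) :
    ∀ q, q ∈ reachIter g n m ((n * m).toNat + 2) PySem.Set.empty ↔
      InB n m q ∧ EmptyAt g q ∧ Esc g n m q := by
  have hnm : (n * m).toNat = n.toNat * m.toNat := by
    rw [show n * m = ((n.toNat * m.toNat : Nat) : Int) by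
      push_cast; rw [Int.toNat_of_nonneg hn, Int.toNat_of_nonneg hm]]
    exact Int.toNat_natCast _
  intro q
  constructor
  · exact fun h => reachIter_sound g n m _ PySem.Set.empty (by intro x hx; cases hx) q h
  · intro ⟨h1, h2, h3⟩
    have hfix := reachIter_fix g n m ((n * m).toNat + 2) PySem.Set.empty
      List.nodup_nil (by intro x hx; cases hx) (by simp [hnm])
    exact fix_complete g n m _ hfix q h3 h1 h2

-- ----- the per-request equality -----

lemma exposing_iff_nbrOk (g : List (List Char)) (n m : Int) (hn : 0 ≤ n) (hm : 0 ≤ m)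
    (p : Int × Int) :
    Exposing g n m p ↔
      nbrOkB n m (reachIter g n m ((n * m).toNat + 2) PySem.Set.empty) p = true := by
  rw [nbrOkB_iff]
  unfold Exposing
  constructor
  · rintro ⟨q, hq, hcase⟩
    obtain ⟨o, ho, rfl⟩ := (mem_nbrsOf _ _).mp hq
    refine ⟨o, ho, ?_⟩
    rcases hcase with h | ⟨he, hesc⟩
    · exact Or.inl h
    · by_cases hqin : InB n m (p.1 + o.1, p.2 + o.2)
      · exact Or.inr ((reach_char g n m hn hm _).mpr ⟨hqin, he, hesc⟩)
      · exact Or.inl hqin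
  · rintro ⟨o, ho, hcase⟩
    refine ⟨(p.1 + o.1, p.2 + o.2), (mem_nbrsOf _ _).mpr ⟨o, ho, rfl⟩, ?_⟩
    rcases hcase with h | h
    · exact Or.inl h
    · obtain ⟨h1, h2, h3⟩ := (reach_char g n m hn hm _).mp h
      exact Or.inr ⟨h2, h3⟩

lemma step_eq (n m : Int) (hn : 0 ≤ n) (hm : 0 ≤ m)
    (st : List (List Char) × Int) (request : String) :
    stepA n m st request = stepB n m st request := by
  unfold stepA stepB
  simp only []
  set g := st.1 with hg
  set force : Bool := request.toList.length == 2 with hforce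
  set target : Char := PySem.List.pyGetD request.toList 0 ' ' with htarget
  rw [queueA_eq_filter n m
    (fun r c => gridGet g r c == target && (force || canRemoveA g n m r c))]
  set cand : List (Int × Int) :=
    (cellsRC n m).filter (fun p => gridGet g p.1 p.2 == target) with hcand
  by_cases hf : force = true
  · rw [if_pos hf]
    have hlist : List.filter (fun p => gridGet g p.1 p.2 == target &&
          (force || canRemoveA g n m p.1 p.2)) (cellsRC n m) = cand := by
      rw [hcand]
      apply List.filter_congr
      intro p _
      rw [hf]
      simp
    rw [hlist]
  · rw [if_neg hf]
    have hfv : force = false := by revert hf; cases force <;> simp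
    have hsplit : List.filter (fun p => gridGet g p.1 p.2 == target &&
          (force || canRemoveA g n m p.1 p.2)) (cellsRC n m) =
        cand.filter (fun p => force || canRemoveA g n m p.1 p.2) := by
      rw [hcand, List.filter_filter]
      apply List.filter_congr
      intro p _
      exact Bool.and_comm _ _
    rw [hsplit]
    by_cases hm0 : cand.isEmpty = true
    · rw [if_pos hm0]
      rw [List.isEmpty_iff] at hm0
      rw [hm0, List.filter_nil]
    · rw [if_neg hm0]
      have hcond : ∀ p ∈ cand,
          (force || canRemoveA g n m p.1 p.2) =
          nbrOkB n m (reachIter g n m ((n * m).toNat + 2) PySem.Set.empty) p := by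
        intro p hp
        rw [hfv, Bool.false_or]
        have hin : InB n m p :=
          (mem_cellsRC n m p).mp (List.mem_filter.mp (hcand ▸ hp)).1
        have h1 : canRemoveA g n m p.1 p.2 = true ↔
            nbrOkB n m (reachIter g n m ((n * m).toNat + 2) PySem.Set.empty) p = true := by
          rw [canRemoveA_iff g n m p.1 p.2 hin, ← exposing_iff_nbrOk g n m hn hm]
        revert h1
        cases canRemoveA g n m p.1 p.2 <;>
          cases nbrOkB n m (reachIter g n m ((n * m).toNat + 2) PySem.Set.empty) p <;>
          simp
      rw [List.filter_congr hcond]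

lemma solution_eq (storage : List String) (requests : List String) :
    solution storage requests = solution_alt storage requests := by
  unfold solution solution_alt
  have hstep : stepA (storage.length : Int) ((PySem.List.pyGetD storage 0 "").toList.length : Int)
      = stepB (storage.length : Int) ((PySem.List.pyGetD storage 0 "").toList.length : Int) := by
    funext st request
    exact step_eq _ _ (Int.natCast_nonneg _) (Int.natCast_nonneg _) st request
  simp only [hstep]

-- ===== VERDICT (by name: the statement is the Claim_ definition above) =====
theorem solution_spec : Claim_equal_solution := by
  intro storage requests _ _
  unfold Spec_solution
  exact solution_eq storage requests
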